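-- pv_equiv track=rewrite | github.com/python-basic-abreualberto/python_basics | lab-refactoring/original_project.py | feedback_codemaker
-- ===== SOURCE A (Python) =====
-- def feedback_codemaker(pattern_maker, pattern_breaker):
--
--     feedback = []
--
--     for i in range(4):
--
--         if pattern_breaker[i] == pattern_maker[i]:
--             feedback.append('black')
--
--         elif pattern_breaker[i] in pattern_maker:
--             feedback.append('white')
--
--         else:
--             feedback.append(' - ')
--
--     return sorted(feedback)
-- ===== SOURCE B (Python) =====
-- def feedback_codemaker(pattern_maker, pattern_breaker):
--     black = 0
--     white = 0
--     for i in range(4):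
--         if pattern_breaker[i] == pattern_maker[i]:
--             black += 1
--         elif pattern_breaker[i] in pattern_maker:
--             white += 1
--     blank = 4 - black - white
--     return [' - '] * blank + ['black'] * black + ['white'] * white
-- ===== Notes on version B (the rewrite author's own statement) =====
-- stated objective: simpler
-- what changed: B tallies black/white counts in one pass and constructs the result directly in sorted order (' - ' < 'black' < 'white'), replacing A's build-a-list-then-sorted().
import Mathlib
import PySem

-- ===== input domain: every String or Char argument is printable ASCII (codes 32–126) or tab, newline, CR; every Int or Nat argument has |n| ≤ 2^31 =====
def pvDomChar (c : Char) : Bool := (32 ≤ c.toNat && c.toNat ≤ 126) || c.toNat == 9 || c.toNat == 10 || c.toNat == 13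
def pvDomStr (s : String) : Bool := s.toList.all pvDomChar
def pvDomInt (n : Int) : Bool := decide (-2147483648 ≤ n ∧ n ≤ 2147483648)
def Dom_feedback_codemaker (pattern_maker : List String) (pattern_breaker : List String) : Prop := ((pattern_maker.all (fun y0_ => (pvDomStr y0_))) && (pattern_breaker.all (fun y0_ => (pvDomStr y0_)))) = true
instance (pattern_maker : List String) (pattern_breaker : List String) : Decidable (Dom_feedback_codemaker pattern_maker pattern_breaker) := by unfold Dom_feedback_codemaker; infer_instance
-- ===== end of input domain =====

-- B tallies black/white counts in one pass and constructs the result directly in sorted order, replacing A's build-then-sorted(); objective: simpler. (No side effects.)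
-- ===== PORT A =====
def feedback_codemaker (pattern_maker : List String) (pattern_breaker : List String) : List String :=
  let feedback : List String := (PySem.List.pyRange 0 4 1).foldl (fun acc i =>
    match PySem.List.pyGet? pattern_breaker i, PySem.List.pyGet? pattern_maker i with
    | some b, some m =>
      if b == m then acc ++ ["black"]
      else if pattern_maker.contains b then acc ++ ["white"]
      else acc ++ [" - "]
    | _, _ => acc) []
  PySem.List.sorted feedback (fun x => x) false

-- ===== PORT B =====
def feedback_codemaker_alt (pattern_maker : List String) (pattern_breaker : List String) : List String :=
  let bw : Int × Int := (PySem.List.pyRange 0 4 1).foldl (fun bw i =>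
    ((PySem.List.pyGet? pattern_breaker i).bind (fun b =>
      (PySem.List.pyGet? pattern_maker i).map (fun m =>
        if b == m then (bw.1 + 1, bw.2)
        else if pattern_maker.contains b then (bw.1, bw.2 + 1)
        else bw))).getD bw) (0, 0)
  let blank : Int := 4 - bw.1 - bw.2
  List.replicate blank.toNat " - " ++ List.replicate bw.1.toNat "black" ++ List.replicate bw.2.toNat "white"

-- ===== PRECONDITION & SPEC =====
-- A raises IndexError when either list has fewer than 4 elements; Pre_ excludes exactly those.
def Pre_feedback_codemaker (pattern_maker : List String) (pattern_breaker : List String) : Prop :=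
  4 ≤ pattern_maker.length ∧ 4 ≤ pattern_breaker.length
instance (pattern_maker : List String) (pattern_breaker : List String) : Decidable (Pre_feedback_codemaker pattern_maker pattern_breaker) := by unfold Pre_feedback_codemaker; infer_instance
def pvWitness_feedback_codemaker : List String × List String := (["r", "g", "b", "y"], ["r", "b", "g", "p"])
def Spec_feedback_codemaker (pattern_maker : List String) (pattern_breaker : List String) (out : List String) : Prop := out = feedback_codemaker_alt pattern_maker pattern_breaker
instance (pattern_maker : List String) (pattern_breaker : List String) (out : List String) : Decidable (Spec_feedback_codemaker pattern_maker pattern_breaker out) := by unfold Spec_feedback_codemaker; infer_instance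

-- ===== CLAIM (what is proved, stated in full; the proofs are below) =====
def Claim_equal_feedback_codemaker : Prop := ∀ (pattern_maker : List String) (pattern_breaker : List String), Dom_feedback_codemaker pattern_maker pattern_breaker → Pre_feedback_codemaker pattern_maker pattern_breaker → Spec_feedback_codemaker pattern_maker pattern_breaker (feedback_codemaker pattern_maker pattern_breaker)

-- ===== LEMMAS AND PROOFS =====

-- ===== VERDICT (by name: the statement is the Claim_ definition above) =====
lemma pg1 {α : Type} (a b : α) (r : List α) : PySem.List.pyGet? (a :: b :: r) 1 = some b := by
  simp [PySem.List.pyGet?, PySem.List.pyIdx?]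

lemma pg2 {α : Type} (a b c : α) (r : List α) : PySem.List.pyGet? (a :: b :: c :: r) 2 = some c := by
  simp [PySem.List.pyGet?, PySem.List.pyIdx?, show (2:Int) ≤ (r.length:Int) + 1 + 1 from by omega]

lemma pg3 {α : Type} (a b c d : α) (r : List α) : PySem.List.pyGet? (a :: b :: c :: d :: r) 3 = some d := by
  simp [PySem.List.pyGet?, PySem.List.pyIdx?, show (3:Int) ≤ (r.length:Int) + 1 + 1 + 1 from by omega]

set_option maxHeartbeats 2000000 in
theorem feedback_codemaker_spec : Claim_equal_feedback_codemaker := by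
  intro pm pb _ hpre
  obtain ⟨h1, h2⟩ := hpre
  match pm, h1 with
  | m0 :: m1 :: m2 :: m3 :: mr, _ =>
  match pb, h2 with
  | b0 :: b1 :: b2 :: b3 :: br, _ =>
  have hr : PySem.List.pyRange 0 4 1 = [0, 1, 2, 3] := by decide
  unfold Spec_feedback_codemaker feedback_codemaker feedback_codemaker_alt
  simp only [hr, List.foldl, PySem.List.pyGet?_zero_cons, pg1, pg2, pg3, Option.bind, Option.map, Option.getD]
  split_ifs <;> simp_all [PySem.List.sorted_eq_foldl_insertBy, PySem.List.insertBy] <;> decide
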